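-- pv_equiv track=rewrite | github.com/vanschependom/KULAK_beginselen-van-programmeren | OZ7/modeloplossing/oef_1_3.py | genereerZinnenALTERNATIEF
-- ===== SOURCE A (Python) =====
-- def genereerZinnenALTERNATIEF(woordenDict, zinSkelet, metDubbels = True):
--     '''
--         Genereert zinnen volgens een gegeven skelet met woorden uit een gegeven dictionary
--     Parameters
--     ----------
--     woordenDict: dict
--         Dictionary waarbij de keys de woorden zijn met de values de functie
--     zinSkelet: list
--         Geeft de structuur van de te genereren zinnen
--     metDubbels: bool:
--         True indien dubbels worden toegelaten
--     Returns
--     -------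
--     list:
--         Lijst van alle gegenereerde zinnen die voldoen aan de structuur
--     '''
--     # Triviaal geval: een leeg skelet, oftewel een lege lijst.
--     if zinSkelet == []:
--         return ["."]  # Laatste karakter van de zin: het leesteken
--     else:
--         resultaat = []
--         # Bepaal de eerste woordsoort (en meteen ook hoe de rest van het skelet eruit ziet)
--         eersteWoordsoort = zinSkelet[0]
--         kleinerZinSkelet = zinSkelet[1:]
--         # Overloop de woorden in de dictionary
--         for woord in woordenDict:
--             # Is het woord van het juiste type?
--             if eersteWoordsoort == woordenDict[woord]:
--                 # Roep recursief de functie op met de rest van het skelet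
--                 # Maar eventueel met een kleinere woordenDict!
--                 kleinereWoordenDict = dict(woordenDict)
--                 # Indien er geen dubbels mogen voorkomen wordt het woord uit de dict gehaald
--                 if not metDubbels:
--                     kleinereWoordenDict.pop(woord)
--                 # Bepaal recursief de zinnen met een kleiner skelet (en evt. kleinere woordenDict)
--                 alleZinnenVoorKleinerSkelet = genereerZinnenALTERNATIEF(kleinereWoordenDict, kleinerZinSkelet, metDubbels)
--                 # Voor elke zin in het deelresultaat
--                 for zin in alleZinnenVoorKleinerSkelet:
--                     # Plak ze aan het woord en voeg toe aan het resultaat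
--                     resultaat.append(woord+" "+zin)
--
--         return resultaat
-- ===== SOURCE B (Python) =====
-- def genereerZinnenALTERNATIEF(woordenDict, zinSkelet, metDubbels = True):
--     '''Same sentences as A, built without re-deriving the suffix per word.'''
--     items = list(woordenDict.items())
--     if metDubbels:
--         # Group the words by word type once, then pick each level's word list
--         # by lookup; the suffix sentence list is shared by every matching word,
--         # so build it once, right-to-left over the skeleton.
--         groups = {}
--         for w, s in items:
--             groups.setdefault(s, []).append(w)
--         levels = [groups.get(soort, []) for soort in zinSkelet]
--         if any(not lv for lv in levels):
--             return []
--         zinnen = ["."]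
--         for lv in reversed(levels):
--             zinnen = [w + " " + z for w in lv for z in zinnen]
--         return zinnen
--     else:
--         # Track the used words in a set instead of copying/shrinking dicts.
--         def gen(skel, used):
--             if not skel:
--                 return ["."]
--             soort, rest = skel[0], skel[1:]
--             return [w + " " + z
--                     for w, s in items if s == soort and w not in used
--                     for z in gen(rest, used | {w})]
--         return gen(zinSkelet, frozenset())
-- ===== Notes on version B (the rewrite author's own statement) =====
-- stated objective: alternative
-- what changed: With duplicates allowed, B groups the words by word type once and builds the sentence list right-to-left over the skeleton, sharing the suffix sentences instead of recomputing the whole suffix recursion for every matching word; without duplicates, B fixes the item list once and tracks used words in a set instead of copying and shrinking a dict at every recursive call.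
import Mathlib
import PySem

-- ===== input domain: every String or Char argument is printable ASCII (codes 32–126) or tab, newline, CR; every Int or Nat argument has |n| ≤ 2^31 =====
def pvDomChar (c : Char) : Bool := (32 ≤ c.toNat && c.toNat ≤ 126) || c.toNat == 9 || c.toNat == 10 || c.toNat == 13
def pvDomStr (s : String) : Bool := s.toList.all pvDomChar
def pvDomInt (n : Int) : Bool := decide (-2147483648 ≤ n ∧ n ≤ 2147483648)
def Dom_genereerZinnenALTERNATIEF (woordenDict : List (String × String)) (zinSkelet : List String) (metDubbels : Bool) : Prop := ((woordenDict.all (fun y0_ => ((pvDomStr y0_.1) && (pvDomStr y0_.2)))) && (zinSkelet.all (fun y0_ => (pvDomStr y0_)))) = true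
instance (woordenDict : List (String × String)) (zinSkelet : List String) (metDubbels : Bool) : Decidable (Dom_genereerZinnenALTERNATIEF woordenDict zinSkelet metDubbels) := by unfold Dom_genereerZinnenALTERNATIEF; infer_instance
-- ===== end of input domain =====

-- ===== PORT A =====
-- B builds each level's word list once and shares the suffix sentences instead of
-- recomputing the suffix recursion per matching word (and tracks used words in a set
-- instead of copying/shrinking dicts): a different algorithm, same return value.
-- Literal port of A: recursion over the skeleton, scanning the (possibly shrunk) dict per matching word.
def pvGenA (d : PySem.Dict String String) (zinSkelet : List String) (metDubbels : Bool) : List String :=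
  match zinSkelet with
  | [] => ["."]
  | eersteWoordsoort :: kleinerZinSkelet =>
    d.keys.foldl (fun resultaat woord =>
      if some eersteWoordsoort == d.get? woord then
        let kleinereWoordenDict := if metDubbels then d else d.erase woord
        resultaat ++ (pvGenA kleinereWoordenDict kleinerZinSkelet metDubbels).map
          (fun zin => woord ++ " " ++ zin)
      else resultaat) []

def genereerZinnenALTERNATIEF (woordenDict : List (String × String)) (zinSkelet : List String) (metDubbels : Bool) : List String :=
  pvGenA (PySem.Dict.ofList woordenDict) zinSkelet metDubbels

-- ===== PORT B =====
-- no-duplicates branch of B: one fixed item list, a set of used words instead of shrinking dicts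
def pvAltGen (items : List (String × String)) (skel : List String) (used : PySem.Set String) : List String :=
  match skel with
  | [] => ["."]
  | soort :: rest =>
    (items.filter (fun p => p.2 == soort && !(PySem.Set.contains used p.1))).flatMap
      (fun p => (pvAltGen items rest (PySem.Set.add used p.1)).map (fun z => p.1 ++ " " ++ z))

def genereerZinnenALTERNATIEF_alt (woordenDict : List (String × String)) (zinSkelet : List String) (metDubbels : Bool) : List String :=
  let items := (PySem.Dict.ofList woordenDict).items
  if metDubbels then
    -- group words by word type once, look each level up, share the suffix list
    let groups := items.foldl (fun g p => g.modify p.2 [] (· ++ [p.1])) PySem.Dict.empty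
    let levels := zinSkelet.map (fun soort => groups.getD soort [])
    if levels.any (fun lv => lv.isEmpty) then []
    else levels.reverse.foldl (fun zinnen lv =>
      lv.flatMap (fun w => zinnen.map (fun z => w ++ " " ++ z))) ["."]
  else
    pvAltGen items zinSkelet PySem.Set.empty

-- ===== PRECONDITION & SPEC =====
def Spec_genereerZinnenALTERNATIEF (woordenDict : List (String × String)) (zinSkelet : List String) (metDubbels : Bool) (out : List String) : Prop := out = genereerZinnenALTERNATIEF_alt woordenDict zinSkelet metDubbels
instance (woordenDict : List (String × String)) (zinSkelet : List String) (metDubbels : Bool) (out : List String) : Decidable (Spec_genereerZinnenALTERNATIEF woordenDict zinSkelet metDubbels out) := by unfold Spec_genereerZinnenALTERNATIEF; infer_instance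

-- ===== CLAIM (what is proved, stated in full; the proofs are below) =====
def Claim_equal_genereerZinnenALTERNATIEF : Prop := ∀ (woordenDict : List (String × String)) (zinSkelet : List String) (metDubbels : Bool), Dom_genereerZinnenALTERNATIEF woordenDict zinSkelet metDubbels → Spec_genereerZinnenALTERNATIEF woordenDict zinSkelet metDubbels (genereerZinnenALTERNATIEF woordenDict zinSkelet metDubbels)

-- ===== LEMMAS AND PROOFS =====

lemma pvGenA_step (d : PySem.Dict String String) (t : String) (rest : List String) (md : Bool) :
    pvGenA d (t :: rest) md =
      (d.keys.filter (fun w => some t == d.get? w)).flatMap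
        (fun w => (pvGenA (if md then d else d.erase w) rest md).map (fun z => w ++ " " ++ z)) := by
  show d.keys.foldl _ [] = _
  rw [PySem.List.foldl_if_eq_foldl_filter (p := fun w => some t == d.get? w)
        (f := fun res w => res ++ (pvGenA (if md then d else d.erase w) rest md).map (fun z => w ++ " " ++ z)),
      PySem.List.foldl_append_eq_flatMap]
  simp

lemma keys_filter_eq (d : PySem.Dict String String) (h : d.keys.Nodup) (t : String) :
    d.keys.filter (fun w => some t == d.get? w) = (d.items.filter (fun p => p.2 == t)).map Prod.fst := by
  obtain ⟨ps⟩ := d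
  induction ps with
  | nil => simp [PySem.Dict.keys]
  | cons p tl ih =>
    simp only [PySem.Dict.keys, PySem.Dict.items, List.map_cons, List.filter_cons] at *
    have hnd : (tl.map Prod.fst).Nodup := (List.nodup_cons.mp h).2
    have hmem : p.1 ∉ tl.map Prod.fst := (List.nodup_cons.mp h).1
    have hget : ∀ w ∈ tl.map Prod.fst,
        ((PySem.Dict.mk ((p :: tl))).get? w) = (PySem.Dict.mk tl).get? w := by
      intro w hw
      rw [PySem.Dict.get?_mk_cons]
      have : (p.1 == w) = false := by
        rw [beq_eq_false_iff_ne]; rintro rfl; exact hmem hw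
      simp [this]
    have hfilter : (tl.map Prod.fst).filter (fun w => some t == (PySem.Dict.mk (p :: tl)).get? w)
        = (tl.map Prod.fst).filter (fun w => some t == (PySem.Dict.mk tl).get? w) := by
      apply List.filter_congr; intro w hw; rw [hget w hw]
    have hhead : (PySem.Dict.mk (p :: tl)).get? p.1 = some p.2 := by
      rw [PySem.Dict.get?_mk_cons]; simp
    rw [hhead, hfilter, ih hnd]
    by_cases hpt : p.2 = t
    · subst hpt; simp
    · have h1 : (some t == some p.2) = false := by simp [Ne.symm hpt]
      have h2 : (p.2 == t) = false := by simp [hpt]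
      simp [h1, h2]
lemma pvGenA_true (d : PySem.Dict String String) (h : d.keys.Nodup) (skel : List String) :
    pvGenA d skel true = skel.foldr (fun t zinnen =>
      (d.items.filter (fun p => p.2 == t)).flatMap
        (fun p => zinnen.map (fun z => p.1 ++ " " ++ z))) ["."] := by
  induction skel with
  | nil => rfl
  | cons t rest ih =>
    rw [List.foldr_cons, ← ih, pvGenA_step, keys_filter_eq d h, List.flatMap_map]
    simp

lemma pvGenA_false (ps : List (String × String)) (hnd : (ps.map Prod.fst).Nodup) (skel : List String) :
    ∀ (used : PySem.Set String) (d : PySem.Dict String String),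
      d.items = ps.filter (fun p => !(PySem.Set.contains used p.1)) →
      pvGenA d skel false = pvAltGen ps skel used := by
  induction skel with
  | nil => intro _ _ _; rfl
  | cons t rest ih =>
    intro used d hd
    have hsub : d.items.Sublist ps := by rw [hd]; exact List.filter_sublist
    have hkn : d.keys.Nodup := hnd.sublist (hsub.map Prod.fst)
    rw [pvGenA_step, keys_filter_eq d hkn, List.flatMap_map]
    show (d.items.filter (fun p => p.2 == t)).flatMap
        (fun p => (pvGenA (d.erase p.1) rest false).map (fun z => p.1 ++ " " ++ z)) = _
    conv_rhs => rw [pvAltGen]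
    have hfl : d.items.filter (fun p => p.2 == t)
        = ps.filter (fun p => p.2 == t && !(PySem.Set.contains used p.1)) := by
      rw [hd, List.filter_filter]
    rw [hfl]
    apply List.flatMap_congr
    intro p hp
    have hcond := List.of_mem_filter hp
    have hpmem := List.mem_of_mem_filter hp
    have hnu : PySem.Set.contains used p.1 = false := by
      rcases Bool.and_eq_true .. |>.mp hcond with ⟨_, h2⟩
      simpa using h2
    congr 1
    apply ih (PySem.Set.add used p.1)
    show (d.items.filter (fun q => !(q.1 == p.1))) = _
    rw [hd, List.filter_filter]
    apply List.filter_congr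
    intro q hq
    have hnu' : List.contains used p.1 = false := hnu
    simp only [PySem.Set.add, PySem.Set.contains, hnu']
    simp only [Bool.false_eq_true, if_false, List.contains_append]
    cases hq1 : q.1 == p.1 <;> cases hc : List.contains used q.1 <;> simp_all



lemma groups_getD (ps : List (String × String)) (t : String) :
    (ps.foldl (fun g p => g.modify p.2 [] (· ++ [p.1])) PySem.Dict.empty).getD t []
      = (ps.filter (fun p => p.2 == t)).map Prod.fst := by
  have h1 : ps.foldl (fun g p => g.modify p.2 [] (· ++ [p.1])) PySem.Dict.empty
      = (ps.map (fun p => (p.2, p.1))).foldl (fun g q => g.modify q.1 [] (· ++ [q.2]))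
          PySem.Dict.empty := by
    rw [List.foldl_map]
  rw [h1, PySem.Dict.getD_foldl_modify_append]
  simp [List.filter_map, List.map_map, Function.comp_def]

lemma foldr_levels_empty (levels : List (List String))
    (h : levels.any (fun lv => lv.isEmpty) = true) :
    levels.foldr (fun lv zinnen => lv.flatMap (fun w => zinnen.map (fun z => w ++ " " ++ z)))
      ["."] = [] := by
  induction levels with
  | nil => simp at h
  | cons lv tl ih =>
    rw [List.foldr_cons]
    rcases List.any_eq_true.mp h with ⟨x, hx, hxe⟩
    rcases List.mem_cons.mp hx with rfl | hxtl
    · rcases List.isEmpty_iff.mp hxe with rfl; simp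
    · rw [ih (List.any_eq_true.mpr ⟨x, hxtl, hxe⟩)]; simp

lemma alt_true_eq (woordenDict : List (String × String)) (zinSkelet : List String) :
    genereerZinnenALTERNATIEF_alt woordenDict zinSkelet true
      = (let L := zinSkelet.map (fun t =>
            (((PySem.Dict.ofList woordenDict).items.filter (fun p => p.2 == t)).map Prod.fst))
         if L.any (fun lv => lv.isEmpty) then []
         else L.reverse.foldl (fun zinnen lv =>
           lv.flatMap (fun w => zinnen.map (fun z => w ++ " " ++ z))) ["."]) := by
  simp only [genereerZinnenALTERNATIEF_alt, if_pos, groups_getD]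

lemma pvPorts_agree (woordenDict : List (String × String)) (zinSkelet : List String) (metDubbels : Bool) :
    pvGenA (PySem.Dict.ofList woordenDict) zinSkelet metDubbels
      = genereerZinnenALTERNATIEF_alt woordenDict zinSkelet metDubbels := by
  have hnd : (PySem.Dict.ofList woordenDict).keys.Nodup := PySem.Dict.nodup_keys_ofList woordenDict
  cases metDubbels with
  | true =>
    rw [pvGenA_true _ hnd, alt_true_eq]
    have hfold : zinSkelet.foldr (fun t zinnen =>
        ((PySem.Dict.ofList woordenDict).items.filter (fun p => p.2 == t)).flatMap
          (fun p => zinnen.map (fun z => p.1 ++ " " ++ z))) ["."]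
      = (zinSkelet.map (fun t =>
            (((PySem.Dict.ofList woordenDict).items.filter (fun p => p.2 == t)).map Prod.fst))).foldr
          (fun lv zinnen => lv.flatMap (fun w => zinnen.map (fun z => w ++ " " ++ z))) ["."] := by
      rw [List.foldr_map]
      congr 1
      funext t zinnen
      rw [List.flatMap_map]
    rw [hfold]
    by_cases hE : (zinSkelet.map (fun t =>
        (((PySem.Dict.ofList woordenDict).items.filter (fun p => p.2 == t)).map Prod.fst))).any
          (fun lv => lv.isEmpty) = true
    · simp only [hE, if_pos]
      exact foldr_levels_empty _ hE
    · simp only [hE, if_neg, Bool.false_eq_true, not_false_eq_true, List.foldl_reverse]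
  | false =>
    show _ = pvAltGen _ _ _
    exact pvGenA_false _ hnd zinSkelet PySem.Set.empty _
      (by simp [PySem.Set.contains, PySem.Set.empty])

-- ===== VERDICT (by name: the statement is the Claim_ definition above) =====
theorem genereerZinnenALTERNATIEF_spec : Claim_equal_genereerZinnenALTERNATIEF := by
  intro woordenDict zinSkelet metDubbels _
  exact pvPorts_agree woordenDict zinSkelet metDubbels
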